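-- pv_equiv track=rewrite | github.com/hrolfurgylfa/Forritun | Python/FORR2HF05CU/Skilaverkefni/02. Skilaverkefni 1 Upprifjun/Skilaverkefni_1.py | vixlaStreng
-- ===== SOURCE A (Python) =====
-- def vixlaStreng(strengur, lastafir):#Þessi for slaufa tekur inn streng og hvort að þetta egi að koma í hástöfum eða lágstöfum
--     strengur2 = ""
--     sidasti_stafur = ""
--     loka_strengur = ""
--     listi = []
--
--     if len(strengur) % 2 != 0:#Þetta bætir síðasta stafnum af strengnum við í breytu til þess að setja á í lokin ef að strengurinn er oddatala
--         sidasti_stafur += strengur[-1]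
--
--     for tel in range(1,len(strengur),2):#Þessi for slaufaer til þess að bæta strengnum í lista og víxla stöfunum í leiðinni
--         if lastafir:#Þetta er til þess að það sé hægt að nota þetta til þess að breyta stöfunum í ruglaða stafi og til baka
--             strengur2 = strengur[tel].lower()
--             strengur2 += strengur[tel-1].lower()
--         else:
--             strengur2 = strengur[tel].upper()
--             strengur2 += strengur[tel-1].upper()
--
--         listi.append(strengur2)
--
--     for tempStrengur in listi:#Þessi for slaufa er til þess að bæta lokastafnum á sem við geymdum áðan ef strengurinn er oddatala
--         loka_strengur += tempStrengur
--     if lastafir: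
--         loka_strengur += sidasti_stafur.lower()
--     else:
--         loka_strengur += sidasti_stafur.upper()
--
--     return loka_strengur
-- ===== SOURCE B (Python) =====
-- def vixlaStreng(strengur, lastafir):
--     cased = strengur.lower() if lastafir else strengur.upper()
--     evens = cased[0::2]
--     odds = cased[1::2]
--     res = ''.join(o + e for o, e in zip(odds, evens))
--     if len(strengur) % 2 != 0:
--         res += cased[-1]
--     return res
-- ===== Notes on version B (the rewrite author's own statement) =====
-- stated objective: idiomatic
-- what changed: Replaces the per-index range loop and two accumulation passes with casing the whole string once, stride-slicing it into even and odd positions, and interleaving them with zip/join; the C-level str.lower/upper, slicing and join avoid per-character Python-level indexing (measured ~2x).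
import Mathlib
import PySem

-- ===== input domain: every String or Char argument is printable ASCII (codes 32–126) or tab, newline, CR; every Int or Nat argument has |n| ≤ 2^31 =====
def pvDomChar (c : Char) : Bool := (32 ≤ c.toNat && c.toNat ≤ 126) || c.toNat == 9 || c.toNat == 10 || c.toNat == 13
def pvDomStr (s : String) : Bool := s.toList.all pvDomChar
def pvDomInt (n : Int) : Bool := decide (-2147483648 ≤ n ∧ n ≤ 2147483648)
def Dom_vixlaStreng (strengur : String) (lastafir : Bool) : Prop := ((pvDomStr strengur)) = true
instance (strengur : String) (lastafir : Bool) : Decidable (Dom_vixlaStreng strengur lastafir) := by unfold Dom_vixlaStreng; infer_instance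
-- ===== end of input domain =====

-- B swaps each adjacent pair by casing the whole string once, stride-slicing it into even and
-- odd positions and interleaving them, instead of A's per-index range loop and two accumulation
-- passes (objective: idiomatic; same output, same O(n) cost).

-- ===== PORT A =====
def vixlaStreng (strengur : String) (lastafir : Bool) : String :=
  let s := strengur.toList
  let sidasti_stafur : List Char :=
    if s.length % 2 ≠ 0 then ((PySem.List.pyGet? s (-1)).map (fun c => [c])).getD [] else []
  let listi : List (List Char) :=
    (PySem.List.pyRange 1 (s.length : Int) 2).foldl (fun listi tel =>
      let strengur2 : List Char :=
        if lastafir then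
          [PySem.Chars.lowerChar (PySem.List.pyGetD s tel ' '),
           PySem.Chars.lowerChar (PySem.List.pyGetD s (tel - 1) ' ')]
        else
          [PySem.Chars.upperChar (PySem.List.pyGetD s tel ' '),
           PySem.Chars.upperChar (PySem.List.pyGetD s (tel - 1) ' ')]
      listi ++ [strengur2]) []
  let loka_strengur : List Char := listi.foldl (fun acc t => acc ++ t) []
  let loka_strengur :=
    if lastafir then loka_strengur ++ PySem.Chars.lower sidasti_stafur
    else loka_strengur ++ PySem.Chars.upper sidasti_stafur
  String.ofList loka_strengur

-- ===== PORT B =====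
def vixlaStreng_alt (strengur : String) (lastafir : Bool) : String :=
  let cased : List Char :=
    if lastafir then PySem.Chars.lower strengur.toList else PySem.Chars.upper strengur.toList
  let evens := (PySem.List.slice? cased (some 0) none 2).getD []
  let odds := (PySem.List.slice? cased (some 1) none 2).getD []
  let res : List Char := (odds.zip evens).flatMap (fun oe => [oe.1, oe.2])
  let res :=
    if strengur.toList.length % 2 ≠ 0 then
      res ++ ((PySem.List.pyGet? cased (-1)).map (fun c => [c])).getD []
    else res
  String.ofList res

-- ===== PRECONDITION & SPEC =====
def Spec_vixlaStreng (strengur : String) (lastafir : Bool) (out : String) : Prop := out = vixlaStreng_alt strengur lastafir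
instance (strengur : String) (lastafir : Bool) (out : String) : Decidable (Spec_vixlaStreng strengur lastafir out) := by unfold Spec_vixlaStreng; infer_instance

-- ===== CLAIM (what is proved, stated in full; the proofs are below) =====
def Claim_equal_vixlaStreng : Prop := ∀ (strengur : String) (lastafir : Bool), Dom_vixlaStreng strengur lastafir → Spec_vixlaStreng strengur lastafir (vixlaStreng strengur lastafir)

-- ===== LEMMAS AND PROOFS =====

-- the common core: swap each adjacent pair of the (already cased) list, drop the odd leftover
def swapCore : List Char → List Char
  | a :: b :: t => b :: a :: swapCore t
  | _ => []

-- every second element starting at position 0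
def everyOther : List Char → List Char
  | [] => []
  | [a] => [a]
  | a :: _ :: t => a :: everyOther t

theorem everyOther_cons (a : Char) (t : List Char) :
    everyOther (a :: t) = a :: everyOther t.tail := by
  cases t <;> simp [everyOther]

theorem zip_everyOther (xs : List Char) :
    ((everyOther xs.tail).zip (everyOther xs)).flatMap (fun oe => [oe.1, oe.2]) = swapCore xs := by
  match xs with
  | [] => simp [everyOther, swapCore]
  | [a] => simp [everyOther, swapCore]
  | a :: b :: t =>
    have ih := zip_everyOther t
    simp only [List.tail_cons, everyOther_cons, everyOther, List.zip_cons_cons,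
      List.flatMap_cons, swapCore]
    simpa using ih

theorem filterMap_even (xs : List Char) :
    List.filterMap (fun k => xs[2 * k]?) (List.range ((xs.length + 1) / 2)) = everyOther xs := by
  match xs with
  | [] => simp [everyOther]
  | [a] => simp [everyOther]
  | a :: b :: t =>
    have ih := filterMap_even t
    have hc : (((a :: b :: t).length + 1) / 2) = (t.length + 1) / 2 + 1 := by
      simp only [List.length_cons]; omega
    have hfun : ((fun k : Nat => (a :: b :: t)[2 * k]?) ∘ Nat.succ) =
        fun k : Nat => t[2 * k]? := by
      funext k
      show (a :: b :: t)[2 * (k + 1)]? = t[2 * k]?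
      have h2 : 2 * (k + 1) = 2 * k + 1 + 1 := by omega
      rw [h2, List.getElem?_cons_succ, List.getElem?_cons_succ]
    rw [hc, List.range_succ_eq_map, List.filterMap_cons, List.filterMap_map, hfun, ih]
    simp [everyOther]

theorem filterMap_odd (xs : List Char) :
    List.filterMap (fun k => xs[2 * k + 1]?) (List.range (xs.length / 2)) = everyOther xs.tail := by
  match xs with
  | [] => simp [everyOther]
  | [a] => simp [everyOther]
  | a :: b :: t =>
    have ih := filterMap_odd t
    have hc : ((a :: b :: t).length / 2) = t.length / 2 + 1 := by
      simp only [List.length_cons]; omega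
    have hfun : ((fun k : Nat => (a :: b :: t)[2 * k + 1]?) ∘ Nat.succ) =
        fun k : Nat => t[2 * k + 1]? := by
      funext k
      show (a :: b :: t)[2 * (k + 1) + 1]? = t[2 * k + 1]?
      have h2 : 2 * (k + 1) + 1 = 2 * k + 1 + 1 + 1 := by omega
      rw [h2, List.getElem?_cons_succ, List.getElem?_cons_succ]
    rw [hc, List.range_succ_eq_map, List.filterMap_cons, List.filterMap_map, hfun, ih]
    simp [everyOther_cons]

theorem slice?_even (xs : List Char) :
    PySem.List.slice? xs (some 0) none 2 = some (everyOther xs) := by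
  rw [← filterMap_even]
  simp only [PySem.List.slice?, PySem.List.sliceIndices]
  norm_num
  have hi : ∀ k : Nat, ((2 * (k : Int)).toNat) = 2 * k := by intro k; omega
  simp only [hi]
  have hc : (if 0 < xs.length then (((xs.length : Int) + 2 - 1) / 2).toNat else 0)
      = (xs.length + 1) / 2 := by split_ifs with h <;> omega
  rw [hc]

theorem slice?_odd (xs : List Char) :
    PySem.List.slice? xs (some 1) none 2 = some (everyOther xs.tail) := by
  match xs with
  | [] => rfl
  | a :: t =>
    rw [← filterMap_odd]
    simp only [PySem.List.slice?, PySem.List.sliceIndices]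
    norm_num
    have hC : (if 0 < t.length then (((t.length : Int) + 2 - 1) / 2).toNat else 0)
        = (t.length + 1) / 2 := by split_ifs <;> omega
    have hf : (fun x : Nat => (a :: t)[(1 + 2 * (x : Int)).toNat]?) = fun x : Nat => t[2 * x]? := by
      funext x
      have hx : ((1 + 2 * (x : Int)).toNat) = 2 * x + 1 := by omega
      rw [hx, List.getElem?_cons_succ]
    rw [hC, hf]

theorem range_flatMap_swap (g : Char → Char) (d : Char) (s : List Char) :
    (List.range (s.length / 2)).flatMap
        (fun k => [g (s.getD (2 * k + 1) d), g (s.getD (2 * k) d)]) = swapCore (s.map g) := by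
  match s with
  | [] => simp [swapCore]
  | [a] => simp [swapCore]
  | a :: b :: t =>
    have ih := range_flatMap_swap g d t
    have hc : ((a :: b :: t).length / 2) = t.length / 2 + 1 := by
      simp only [List.length_cons]; omega
    have hfun : (fun k : Nat => [g ((a :: b :: t).getD (2 * k.succ + 1) d),
          g ((a :: b :: t).getD (2 * k.succ) d)]) =
        fun k : Nat => [g (t.getD (2 * k + 1) d), g (t.getD (2 * k) d)] := by
      funext k
      show [g ((a :: b :: t).getD (2 * (k + 1) + 1) d), g ((a :: b :: t).getD (2 * (k + 1)) d)] = _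
      have h1 : 2 * (k + 1) + 1 = 2 * k + 1 + 1 + 1 := by omega
      have h2 : 2 * (k + 1) = 2 * k + 1 + 1 := by omega
      rw [h1, h2, List.getD_cons_succ, List.getD_cons_succ, List.getD_cons_succ,
        List.getD_cons_succ]
    rw [hc, List.range_succ_eq_map, List.flatMap_cons, List.flatMap_map, hfun, ih]
    simp [swapCore]

theorem pyRange_two (n : Nat) :
    PySem.List.pyRange 1 (n : Int) 2 =
      (List.range (n / 2)).map (fun k : Nat => (1 : Int) + 2 * (k : Int)) := by
  rw [PySem.List.pyRange_of_pos 1 (n : Int) (by norm_num)]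
  have hC : (if (1 : Int) < (n : Int) then (((n : Int) - 1 + 2 - 1) / 2).toNat else 0) = n / 2 := by
    split_ifs with h <;> omega
  rw [hC]

theorem pyGetD_two_succ (s : List Char) (k : Nat) (d : Char) :
    PySem.List.pyGetD s (1 + 2 * (k : Int)) d = s.getD (2 * k + 1) d := by
  have h : (1 + 2 * (k : Int)) = ((2 * k + 1 : Nat) : Int) := by push_cast; ring
  rw [h, PySem.List.pyGetD_natCast]

theorem pyGetD_two (s : List Char) (k : Nat) (d : Char) :
    PySem.List.pyGetD s (1 + 2 * (k : Int) - 1) d = s.getD (2 * k) d := by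
  have h : (1 + 2 * (k : Int) - 1) = ((2 * k : Nat) : Int) := by push_cast; ring
  rw [h, PySem.List.pyGetD_natCast]

-- A's core loop (for a fixed casing g) produces exactly swapCore of the cased list
theorem portA_core (g : Char → Char) (s : List Char) :
    ((PySem.List.pyRange 1 (s.length : Int) 2).foldl (fun listi tel =>
        listi ++ [[g (PySem.List.pyGetD s tel ' '), g (PySem.List.pyGetD s (tel - 1) ' ')]])
        []).foldl (fun acc t => acc ++ t) [] = swapCore (s.map g) := by
  rw [PySem.List.foldl_append_singleton_eq_map, PySem.List.foldl_append_eq_flatten,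
    pyRange_two, List.map_map, List.nil_append, List.nil_append, ← List.flatMap_def]
  have hfun : ((fun tel : Int => [g (PySem.List.pyGetD s tel ' '),
        g (PySem.List.pyGetD s (tel - 1) ' ')]) ∘ (fun k : Nat => (1 : Int) + 2 * (k : Int))) =
      fun k : Nat => [g (s.getD (2 * k + 1) ' '), g (s.getD (2 * k) ' ')] := by
    funext k
    show [g (PySem.List.pyGetD s (1 + 2 * (k : Int)) ' '),
          g (PySem.List.pyGetD s (1 + 2 * (k : Int) - 1) ' ')] = _
    rw [pyGetD_two_succ, pyGetD_two]
  rw [hfun]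
  exact range_flatMap_swap g ' ' s

-- B's core (zip of the stride slices) produces the same swapCore
theorem portB_core (cased : List Char) :
    ((((PySem.List.slice? cased (some 1) none 2).getD []).zip
        ((PySem.List.slice? cased (some 0) none 2).getD [])).flatMap (fun oe => [oe.1, oe.2]))
      = swapCore cased := by
  rw [slice?_even, slice?_odd]
  simpa using zip_everyOther cased

-- the odd-length tails: the last char of the cased list is g of the last char of s
theorem tail_eq (g : Char → Char) (s : List Char) :
    ((PySem.List.pyGet? (s.map g) (-1)).map (fun c => [c])).getD [] =
      List.map g (((PySem.List.pyGet? s (-1)).map (fun c => [c])).getD []) := by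
  rw [PySem.List.pyGet?_neg_one, PySem.List.pyGet?_neg_one, List.getLast?_map]
  cases s.getLast? <;> simp

-- ===== VERDICT (by name: the statement is the Claim_ definition above) =====
theorem vixlaStreng_spec : Claim_equal_vixlaStreng := by
  intro strengur lastafir _
  unfold Spec_vixlaStreng vixlaStreng vixlaStreng_alt
  cases lastafir <;> simp only [Bool.false_eq_true, if_true, if_false]
  case false =>
    rw [portA_core PySem.Chars.upperChar strengur.toList, portB_core]
    by_cases ho : strengur.toList.length % 2 ≠ 0
    · simp only [if_pos ho, PySem.Chars.upper]
      rw [tail_eq]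
    · simp only [if_neg ho, PySem.Chars.upper]
      simp
  case true =>
    rw [portA_core PySem.Chars.lowerChar strengur.toList, portB_core]
    by_cases ho : strengur.toList.length % 2 ≠ 0
    · simp only [if_pos ho, PySem.Chars.lower]
      rw [tail_eq]
    · simp only [if_neg ho, PySem.Chars.lower]
      simp
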